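-- pv_equiv track=rewrite | github.com/marcoantonioaav/trabalho_otimizacao | src/read_file.py | read_cp
-- ===== SOURCE A (Python) =====
-- def remove_lines(lines, number_of_lines):
--     return lines[number_of_lines:]
--
-- def read_cp(lines, n):
--     new_lines = remove_lines(lines, 2)
--     new_lines = new_lines[:n-1]
--     cP = [None]*n
--     for i in range(n):
--         cP_line = [None]*n
--         for j in range(n):
--             if i == j:
--                 cP_line[j] = 0
--             else:
--                 new_j = j-(i+1)
--                 if new_j >= 0:
--                     cP_line[j] = int(new_lines[i][new_j])
--                 else:
--                     cP_line[j] = cP[j][i]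
--         cP[i] = cP_line
--     return cP
-- ===== SOURCE B (Python) =====
-- def read_cp(lines, n):
--     new_lines = lines[2:][:n-1]
--     cP = [[0] * n for _ in range(n)]
--     for i in range(n - 1):
--         row = new_lines[i]
--         for k in range(n - 1 - i):
--             v = int(row[k])
--             j = i + 1 + k
--             cP[i][j] = v
--             cP[j][i] = v
--     return cP
-- ===== Notes on version B (the rewrite author's own statement) =====
-- stated objective: alternative
-- what changed: Starts from an all-zero n x n matrix and makes a single pass over the upper triangle of the file data, mirroring each value into both cP[i][j] and cP[j][i], instead of A's two-phase build that fills every cell of every row and copies the lower triangle out of previously constructed rows.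
import Mathlib
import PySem

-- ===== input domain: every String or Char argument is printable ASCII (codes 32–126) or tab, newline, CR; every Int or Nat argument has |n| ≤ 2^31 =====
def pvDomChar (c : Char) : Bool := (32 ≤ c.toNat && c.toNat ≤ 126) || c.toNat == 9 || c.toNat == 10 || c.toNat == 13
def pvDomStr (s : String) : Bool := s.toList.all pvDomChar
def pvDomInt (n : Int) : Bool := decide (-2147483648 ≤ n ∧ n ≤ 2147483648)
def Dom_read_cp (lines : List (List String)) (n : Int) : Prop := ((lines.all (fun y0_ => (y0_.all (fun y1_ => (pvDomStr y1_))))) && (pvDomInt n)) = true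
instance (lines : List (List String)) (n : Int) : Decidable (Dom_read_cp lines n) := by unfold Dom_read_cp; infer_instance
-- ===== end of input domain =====

-- B starts from an all-zero n×n matrix and makes one pass over the upper triangle of the file
-- data, mirroring each value into both cP[i][j] and cP[j][i], instead of A's two-phase build
-- that fills every cell and copies the lower triangle out of previously constructed rows.

-- ===== PORT A =====
def remove_lines (lines : List (List String)) (number_of_lines : Int) : List (List String) :=
  PySem.List.slice lines (some number_of_lines) none

def read_cp (lines : List (List String)) (n : Int) : List (List Int) :=
  let new_lines := PySem.List.slice (remove_lines lines 2) none (some (n - 1))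
  -- [None]*n : placeholder rows (never read before being overwritten); only valid indices occur under Pre_
  let cP0 : List (List Int) := List.replicate n.toNat []
  (PySem.List.pyRange 0 n 1).foldl (fun cP i =>
    let cP_line : List Int :=
      (PySem.List.pyRange 0 n 1).foldl (fun line j =>
        let v : Int :=
          if i = j then 0
          else
            let new_j := j - (i + 1)
            if new_j ≥ 0 then
              (PySem.Int.ofStr? ((PySem.List.pyGet? ((PySem.List.pyGet? new_lines i).getD []) new_j).getD "")).getD 0
            else
              (PySem.List.pyGet? ((PySem.List.pyGet? cP j).getD []) i).getD 0
        PySem.List.pySetD line j v) (List.replicate n.toNat 0)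
    PySem.List.pySetD cP i cP_line) cP0

-- ===== PORT B =====
def read_cp_alt (lines : List (List String)) (n : Int) : List (List Int) :=
  let new_lines := PySem.List.slice (PySem.List.slice lines (some 2) none) none (some (n - 1))
  let cP0 : List (List Int) := (PySem.List.pyRange 0 n 1).map (fun _ => List.replicate n.toNat 0)
  (PySem.List.pyRange 0 (n - 1) 1).foldl (fun cP i =>
    let row := (PySem.List.pyGet? new_lines i).getD []
    (PySem.List.pyRange 0 (n - 1 - i) 1).foldl (fun cP k =>
      let v : Int := (PySem.Int.ofStr? ((PySem.List.pyGet? row k).getD "")).getD 0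
      let j := i + 1 + k
      let cP1 := PySem.List.pySetD cP i (PySem.List.pySetD ((PySem.List.pyGet? cP i).getD []) j v)
      PySem.List.pySetD cP1 j (PySem.List.pySetD ((PySem.List.pyGet? cP1 j).getD []) i v)) cP) cP0

-- ===== PRECONDITION & SPEC =====
-- Pre_ excludes exactly the inputs where Python A raises: n ≥ 2 with fewer than n+1 lines
-- (IndexError on new_lines[i]), a triangle row shorter than n-1-i (IndexError), or a
-- non-int entry in the read part of a row (ValueError).
def Pre_read_cp (lines : List (List String)) (n : Int) : Prop :=
  n ≤ 1 ∨
    (n + 1 ≤ (lines.length : Int) ∧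
      ∀ i ∈ List.range (n - 1).toNat,
        ((n - 1).toNat - i ≤ (lines.getD (2 + i) []).length ∧
         ∀ k ∈ List.range ((n - 1).toNat - i),
           (PySem.Int.ofStr? ((lines.getD (2 + i) []).getD k "")).isSome = true))
instance (lines : List (List String)) (n : Int) : Decidable (Pre_read_cp lines n) := by
  unfold Pre_read_cp; infer_instance

def pvWitness_read_cp : List (List String) × Int :=
  ([["h"], ["h"], ["3", "5"], ["7"]], 3)

def Spec_read_cp (lines : List (List String)) (n : Int) (out : List (List Int)) : Prop := out = read_cp_alt lines n
instance (lines : List (List String)) (n : Int) (out : List (List Int)) : Decidable (Spec_read_cp lines n out) := by unfold Spec_read_cp; infer_instance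

-- ===== CLAIM (what is proved, stated in full; the proofs are below) =====
def Claim_equal_read_cp : Prop := ∀ (lines : List (List String)) (n : Int), Dom_read_cp lines n → Pre_read_cp lines n → Spec_read_cp lines n (read_cp lines n)

-- ===== LEMMAS AND PROOFS =====

-- value read from the triangle (total form used by both ports)
def pvV (nl : List (List String)) (a b : Int) : Int :=
  (PySem.Int.ofStr? ((PySem.List.pyGet? ((PySem.List.pyGet? nl a).getD []) b).getD "")).getD 0

-- the (symmetric) per-cell value both ports produce, on Nat indices
def pvCell (nl : List (List String)) (i j : Nat) : Int :=
  if (i : Int) = (j : Int) then 0 else pvV nl (min (i : Int) (j : Int)) (|(i : Int) - (j : Int)| - 1)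

def pvRow (nl : List (List String)) (N i : Nat) : List Int := (List.range N).map (pvCell nl i)

-- the matrix [[g a b for b in range N] for a in range N]
def pvMat (nl : List (List String)) (N : Nat) (g : List (List String) → Nat → Nat → Int) : List (List Int) :=
  (List.range N).map (fun a => (List.range N).map (g nl a))

lemma pvCell_symm (nl : List (List String)) (i j : Nat) : pvCell nl i j = pvCell nl j i := by
  unfold pvCell
  rcases eq_or_ne (i : Int) (j : Int) with h | h
  · simp [h]
  · simp [h, Ne.symm h, min_comm, abs_sub_comm]

lemma pvCell_diag (nl : List (List String)) (i : Nat) : pvCell nl i i = 0 := by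
  simp [pvCell]

lemma pvCell_upper (nl : List (List String)) (i k : Nat) :
    pvCell nl i (i + 1 + k) = pvV nl (i : Int) (k : Int) := by
  unfold pvCell
  rw [if_neg (by push_cast; omega)]
  have h1 : min ((i : Nat) : Int) (((i + 1 + k : Nat)) : Int) = (i : Int) := by push_cast; omega
  have h2 : |((i : Nat) : Int) - (((i + 1 + k : Nat)) : Int)| - 1 = (k : Int) := by
    rw [abs_sub_comm]
    rw [abs_of_nonneg (by push_cast; omega)]
    push_cast; omega
  rw [h1, h2]

-- ===== A-side: a foldl that writes F k at index k, for k = 0..m-1 =====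
lemma setFold (F : Nat → Int) (m : Nat) (s : List Int) (hm : m ≤ s.length) :
    (List.range m).foldl (fun line (k : Nat) => line.set k (F k)) s
      = (List.range m).map F ++ s.drop m := by
  induction m with
  | zero => simp
  | succ m ih =>
    rw [List.range_succ, List.foldl_append, ih (by omega)]
    simp only [List.foldl_cons, List.foldl_nil]
    have hd : List.drop m s = s[m] :: List.drop (m + 1) s := List.drop_eq_getElem_cons (by omega)
    rw [List.set_append, if_neg (by simp)]
    simp only [List.length_map, List.length_range, Nat.sub_self, hd, List.set_cons_zero,
      List.map_append, List.map_cons, List.map_nil,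
      List.append_assoc, List.cons_append, List.nil_append]

lemma outer_inv (nl : List (List String)) (N : Nat) (m : Nat) (hm : m ≤ N) :
    List.foldl
      (fun x (y : Nat) =>
        PySem.List.pySetD x ((y : Int))
          (List.foldl
            (fun x_1 (y_1 : Nat) =>
              PySem.List.pySetD x_1 ((y_1 : Int))
                (if (y : Int) = (y_1 : Int) then 0
                 else
                   if (y_1 : Int) - ((y : Int) + 1) ≥ 0 then
                     (PySem.Int.ofStr? ((PySem.List.pyGet? ((PySem.List.pyGet? nl (y : Int)).getD []) ((y_1 : Int) - ((y : Int) + 1))).getD "")).getD 0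
                   else (PySem.List.pyGet? ((PySem.List.pyGet? x (y_1 : Int)).getD []) (y : Int)).getD 0))
            (List.replicate N 0) (List.range N)))
      (List.replicate N []) (List.range m)
    = List.map (pvRow nl N) (List.range m) ++ List.replicate (N - m) [] := by
  induction m with
  | zero => simp
  | succ m ih =>
    rw [List.range_succ, List.foldl_append, ih (by omega)]
    simp only [List.foldl_cons, List.foldl_nil, PySem.List.pySetD_natCast]
    rw [setFold _ N (List.replicate N 0) (by simp)]
    have hrow : ∀ j ∈ List.range N,
        (if (m : Int) = (j : Int) then 0
         else
           if (j : Int) - ((m : Int) + 1) ≥ 0 then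
             (PySem.Int.ofStr? ((PySem.List.pyGet? ((PySem.List.pyGet? nl (m : Int)).getD []) ((j : Int) - ((m : Int) + 1))).getD "")).getD 0
           else (PySem.List.pyGet? ((PySem.List.pyGet? (List.map (pvRow nl N) (List.range m) ++ List.replicate (N - m) []) (j : Int)).getD []) (m : Int)).getD 0)
        = pvCell nl m j := by
      intro j hj
      rw [List.mem_range] at hj
      by_cases h1 : (m : Int) = (j : Int)
      · simp [pvCell, h1]
      · rw [if_neg h1]
        by_cases h2 : (j : Int) - ((m : Int) + 1) ≥ 0
        · rw [if_pos h2]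
          show pvV nl (m : Int) ((j : Int) - ((m : Int) + 1)) = pvCell nl m j
          have hmj : (m : Int) ≤ (j : Int) := by omega
          have habs : |(m : Int) - (j : Int)| = (j : Int) - (m : Int) := by
            rw [abs_sub_comm]; exact abs_of_nonneg (by omega)
          unfold pvCell
          rw [if_neg h1, min_eq_left hmj, habs]
          congr 1
          omega
        · rw [if_neg h2]
          have hjm : j < m := by omega
          have hmN : m < N := by omega
          simp only [PySem.List.pyGet?_natCast]
          rw [List.getElem?_append_left (by simpa using hjm)]
          simp only [List.getElem?_map, List.getElem?_range hjm, Option.map_some,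
            Option.getD_some, pvRow, List.getElem?_range hmN]
          exact pvCell_symm nl j m
    rw [List.map_congr_left hrow]
    rw [List.set_append, if_neg (by simp)]
    have hNm : N - m = (N - (m + 1)) + 1 := by omega
    rw [hNm, List.replicate_succ]
    simp only [List.length_map, List.length_range, Nat.sub_self, List.set_cons_zero,
      List.drop_replicate, List.map_append, List.map_cons,
      List.map_nil, List.append_assoc, List.cons_append, List.nil_append]
    simp [pvRow]

-- A's result is the closed-form cell matrix
lemma read_cp_eq_mat (lines : List (List String)) (n : Int) :
    read_cp lines n
      = pvMat (PySem.List.slice (PySem.List.slice lines (some 2) none) none (some (n - 1))) n.toNat pvCell := by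
  unfold read_cp remove_lines
  simp only [PySem.List.pyRange_one, List.foldl_map, zero_add, Int.sub_zero]
  rw [outer_inv (PySem.List.slice (PySem.List.slice lines (some 2) none) none (some (n - 1))) n.toNat n.toNat le_rfl]
  simp [pvRow, pvMat]

-- ===== B-side =====

-- setting one cell of a range-map matrix updates the generating function pointwise
lemma setMapRange {α : Type} (N b : Nat) (f : Nat → α) (v : α) (_hb : b < N) :
    ((List.range N).map f).set b v
      = (List.range N).map (fun y => if y = b then v else f y) := by
  apply List.ext_getElem
  · simp
  · intro k h1 h2
    simp only [List.getElem_set, List.getElem_map, List.getElem_range]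
    simp only [List.length_set, List.length_map, List.length_range] at h1
    split_ifs with h3 h4 h4
    · rfl
    · omega
    · omega
    · rfl

lemma cellSet (nl : List (List String)) (N : Nat) (g : List (List String) → Nat → Nat → Int)
    (a b : Nat) (v : Int) (ha : a < N) (hb : b < N) :
    PySem.List.pySetD (pvMat nl N g) ((a : Nat) : Int)
        (PySem.List.pySetD ((PySem.List.pyGet? (pvMat nl N g) ((a : Nat) : Int)).getD []) ((b : Nat) : Int) v)
      = pvMat nl N (fun nl x y => if x = a ∧ y = b then v else g nl x y) := by
  unfold pvMat
  simp only [PySem.List.pySetD_natCast, PySem.List.pyGet?_natCast,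
    List.getElem?_map, List.getElem?_range ha, Option.map_some, Option.getD_some]
  rw [setMapRange N b (g nl a) v hb, setMapRange N a _ _ ha]
  apply List.map_congr_left
  intro x hx
  by_cases hxa : x = a
  · subst hxa
    rw [if_pos rfl]
    apply List.map_congr_left
    intro y hy
    by_cases hyb : y = b <;> simp [hyb]
  · rw [if_neg hxa]
    apply List.map_congr_left
    intro y hy
    simp [hxa]

-- bridge: the literal cell-read expression is pvV (definitional)
lemma pvV_eq (nl : List (List String)) (a b : Int) :
    (PySem.Int.ofStr? ((PySem.List.pyGet? ((PySem.List.pyGet? nl a).getD []) b).getD "")).getD 0 = pvV nl a b := rfl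

-- state of the matrix after the first K inner steps of B's row i
def pvG1 (g : List (List String) → Nat → Nat → Int) (i K : Nat) : List (List String) → Nat → Nat → Int :=
  fun nl x y =>
    if (x = i ∧ i < y ∧ y ≤ i + K) ∨ (y = i ∧ i < x ∧ x ≤ i + K) then pvCell nl x y else g nl x y

lemma inner_inv (nl : List (List String)) (N : Nat) (g : List (List String) → Nat → Nat → Int)
    (i : Nat) (K : Nat) (hK : i + 1 + K ≤ N) :
    (List.range K).foldl
      (fun cP (k : Nat) =>
        PySem.List.pySetD
          (PySem.List.pySetD cP (i : Int)
            (PySem.List.pySetD ((PySem.List.pyGet? cP (i : Int)).getD []) ((i : Int) + 1 + (k : Int)) (pvV nl (i : Int) (k : Int))))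
          ((i : Int) + 1 + (k : Int))
          (PySem.List.pySetD
            ((PySem.List.pyGet?
                (PySem.List.pySetD cP (i : Int)
                  (PySem.List.pySetD ((PySem.List.pyGet? cP (i : Int)).getD []) ((i : Int) + 1 + (k : Int)) (pvV nl (i : Int) (k : Int))))
                ((i : Int) + 1 + (k : Int))).getD [])
            (i : Int) (pvV nl (i : Int) (k : Int))))
      (pvMat nl N g)
    = pvMat nl N (pvG1 g i K) := by
  induction K with
  | zero =>
    simp only [List.range_zero, List.foldl_nil]
    unfold pvMat
    apply List.map_congr_left; intro x hx
    apply List.map_congr_left; intro y hy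
    simp only [pvG1]
    rw [if_neg (by omega)]
  | succ K ih =>
    rw [List.range_succ, List.foldl_append, ih (by omega), List.foldl_cons, List.foldl_nil]
    have hj : ((i : Int) + 1 + (K : Int)) = (((i + 1 + K : Nat)) : Int) := by push_cast; ring
    simp only [hj]
    rw [cellSet nl N (pvG1 g i K) i (i + 1 + K) (pvV nl (i : Int) (K : Int)) (by omega) (by omega)]
    rw [cellSet nl N _ (i + 1 + K) i (pvV nl (i : Int) (K : Int)) (by omega) (by omega)]
    unfold pvMat
    apply List.map_congr_left; intro x hx
    apply List.map_congr_left; intro y hy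
    simp only [pvG1]
    by_cases h1 : x = i + 1 + K ∧ y = i
    · rw [if_pos h1, if_pos (by omega)]
      obtain ⟨hx1, hy1⟩ := h1; subst hx1; subst hy1
      rw [pvCell_symm, pvCell_upper]
    · rw [if_neg h1]
      by_cases h2 : x = i ∧ y = i + 1 + K
      · rw [if_pos h2, if_pos (by omega)]
        obtain ⟨hx1, hy1⟩ := h2; subst hx1; subst hy1
        rw [pvCell_upper]
      · rw [if_neg h2]
        by_cases h3 : (x = i ∧ i < y ∧ y ≤ i + K) ∨ (y = i ∧ i < x ∧ x ≤ i + K)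
        · rw [if_pos h3, if_pos (by omega)]
        · rw [if_neg h3, if_neg (by omega)]

-- state of the matrix after the first m outer steps of B
def pvG (N m : Nat) : List (List String) → Nat → Nat → Int :=
  fun nl x y =>
    if (x < m ∧ x < y ∧ y + 1 ≤ N) ∨ (y < m ∧ y < x ∧ x + 1 ≤ N) then pvCell nl x y else 0

lemma outer_inv_alt (nl : List (List String)) (n : Int) (m : Nat) (hm : m ≤ (n - 1).toNat) :
    (List.range m).foldl
      (fun cP (i : Nat) =>
        (List.range (n - 1 - (i : Int)).toNat).foldl
          (fun cP (k : Nat) =>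
            PySem.List.pySetD
              (PySem.List.pySetD cP (i : Int)
                (PySem.List.pySetD ((PySem.List.pyGet? cP (i : Int)).getD []) ((i : Int) + 1 + (k : Int)) (pvV nl (i : Int) (k : Int))))
              ((i : Int) + 1 + (k : Int))
              (PySem.List.pySetD
                ((PySem.List.pyGet?
                    (PySem.List.pySetD cP (i : Int)
                      (PySem.List.pySetD ((PySem.List.pyGet? cP (i : Int)).getD []) ((i : Int) + 1 + (k : Int)) (pvV nl (i : Int) (k : Int))))
                    ((i : Int) + 1 + (k : Int))).getD [])
                (i : Int) (pvV nl (i : Int) (k : Int))))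
          cP)
      (pvMat nl n.toNat (pvG n.toNat 0))
    = pvMat nl n.toNat (pvG n.toNat m) := by
  induction m with
  | zero => simp
  | succ m ih =>
    rw [List.range_succ, List.foldl_append, ih (by omega), List.foldl_cons, List.foldl_nil]
    have hK : m + 1 + (n - 1 - (m : Int)).toNat ≤ n.toNat := by omega
    rw [inner_inv nl n.toNat (pvG n.toNat m) m ((n - 1 - (m : Int)).toNat) hK]
    unfold pvMat
    apply List.map_congr_left; intro x hx
    apply List.map_congr_left; intro y hy
    rw [List.mem_range] at hx hy
    simp only [pvG1, pvG]
    by_cases h1 : (x = m ∧ m < y ∧ y ≤ m + (n - 1 - (m : Int)).toNat) ∨ (y = m ∧ m < x ∧ x ≤ m + (n - 1 - (m : Int)).toNat)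
    · rw [if_pos h1, if_pos (by omega)]
    · rw [if_neg h1]
      by_cases h2 : (x < m ∧ x < y ∧ y + 1 ≤ n.toNat) ∨ (y < m ∧ y < x ∧ x + 1 ≤ n.toNat)
      · rw [if_pos h2, if_pos (by omega)]
      · rw [if_neg h2, if_neg (by omega)]

-- B's result is the same closed-form cell matrix
lemma read_cp_alt_eq_mat (lines : List (List String)) (n : Int) :
    read_cp_alt lines n
      = pvMat (PySem.List.slice (PySem.List.slice lines (some 2) none) none (some (n - 1))) n.toNat pvCell := by
  unfold read_cp_alt
  set nl := PySem.List.slice (PySem.List.slice lines (some 2) none) none (some (n - 1)) with hnl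
  simp only [PySem.List.pyRange_one, List.foldl_map, zero_add, Int.sub_zero, pvV_eq]
  have hcP0 : List.map (fun _ : Int => List.replicate n.toNat (0 : Int)) (List.map (fun k : Nat => (k : Int)) (List.range n.toNat))
      = pvMat nl n.toNat (pvG n.toNat 0) := by
    unfold pvMat pvG
    rw [List.map_map]
    apply List.map_congr_left; intro a ha
    simp
  rw [hcP0]
  rw [outer_inv_alt nl n (n - 1).toNat le_rfl]
  unfold pvMat pvG
  apply List.map_congr_left; intro x hx
  apply List.map_congr_left; intro y hy
  rw [List.mem_range] at hx hy
  by_cases hxy : x = y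
  · subst hxy
    rw [if_neg (by omega), pvCell_diag]
  · rw [if_pos (by omega)]

-- ===== VERDICT =====
theorem read_cp_spec : Claim_equal_read_cp := by
  intro lines n _ _
  unfold Spec_read_cp
  rw [read_cp_eq_mat, read_cp_alt_eq_mat]
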